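-- pv_equiv track=rewrite | github.com/jskim7018/leetcode_study | algorithm_study/2025/12/20251222/medium/LC_3528.py | baseUnitConversions
-- ===== SOURCE A (Python) =====
-- from typing import List
--
-- def baseUnitConversions(conversions: List[List[int]]) -> List[int]:
--     mod = 10**9 + 7
--
--     n = len(conversions) + 1
--
--     graph = [[] for _ in range(n)]
--
--     for c in conversions:
--         graph[c[0]].append((c[1],c[2]))
--
--     ans = [0] * n
--     def dfs(v: int, curr_conv: int):
--         ans[v] = curr_conv
--
--         for nv, convFactor in graph[v]:
--             dfs(nv, convFactor * curr_conv % mod)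
--
--     dfs(0, 1)
--
--     return ans
-- ===== SOURCE B (Python) =====
-- from typing import List
--
-- def baseUnitConversions(conversions: List[List[int]]) -> List[int]:
--     mod = 10**9 + 7
--     n = len(conversions) + 1
--     graph = [[] for _ in range(n)]
--     for c in conversions:
--         graph[c[0]].append((c[1], c[2]))
--     # Phase 1: iterative DFS with an explicit stack, recording the sequence of
--     # (unit, factor) writes in the same preorder as A's recursion.
--     writes = []
--     stack = [(0, 1)]
--     while stack:
--         v, curr = stack.pop()
--         writes.append((v, curr))
--         for nv, factor in reversed(graph[v]):
--             stack.append((nv, factor * curr % mod))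
--     # Phase 2: replay the write trace (later writes win, as in A).
--     ans = [0] * n
--     for v, val in writes:
--         ans[v] = val
--     return ans
-- ===== Notes on version B (the rewrite author's own statement) =====
-- stated objective: alternative
-- what changed: A's recursive DFS that mutates ans in place is replaced by a two-phase computation: an explicit-stack iterative traversal (children pushed in reverse, so the pop order equals A's visit order) that only records the preorder (unit, factor) write trace, followed by a single replay pass that materialises the answer array; the graph build is the same.
import Mathlib
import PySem

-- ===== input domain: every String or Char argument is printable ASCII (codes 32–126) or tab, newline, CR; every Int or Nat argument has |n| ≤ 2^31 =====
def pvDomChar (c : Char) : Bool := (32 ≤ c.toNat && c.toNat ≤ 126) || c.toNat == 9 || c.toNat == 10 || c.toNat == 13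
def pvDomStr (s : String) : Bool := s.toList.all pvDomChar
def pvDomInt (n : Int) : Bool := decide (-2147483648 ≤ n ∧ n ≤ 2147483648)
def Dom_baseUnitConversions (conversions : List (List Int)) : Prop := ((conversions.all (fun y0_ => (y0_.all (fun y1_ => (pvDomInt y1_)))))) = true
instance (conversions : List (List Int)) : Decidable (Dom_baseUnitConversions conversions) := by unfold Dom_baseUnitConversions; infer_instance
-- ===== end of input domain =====

-- B replaces A's recursive in-place DFS by a two-phase computation: an explicit-stack loop
-- that only records the preorder write trace, followed by one replay pass that materialises
-- the answer array (later writes win, exactly as A's in-place assignments do).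

-- ===== PORT A =====
def pvMod : Int := 1000000007

-- Python c[0], c[1], c[2] (exact; Pre_ guarantees length ≥ 3, so the default is never used)
def pvC0 (c : List Int) : Int := PySem.List.pyGetD c 0 0
def pvC1 (c : List Int) : Int := PySem.List.pyGetD c 1 0
def pvC2 (c : List Int) : Int := PySem.List.pyGetD c 2 0

-- graph[c[0]].append((c[1], c[2])) — read the row (negative index wraps), set it back extended;
-- exact in range (an out-of-range source raises in Python and is excluded by Pre_)
def pvStep (gr : List (List (Int × Int))) (c : List Int) : List (List (Int × Int)) :=
  match PySem.List.pyGet? gr (pvC0 c) with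
  | some l => PySem.List.pySetD gr (pvC0 c) (l ++ [(pvC1 c, pvC2 c)])
  | none => gr

-- both Pythons build the adjacency list with this identical loop
def pvBuild (conversions : List (List Int)) : List (List (Int × Int)) :=
  conversions.foldl pvStep (List.replicate (conversions.length + 1) [])

-- graph[v] (negative v wraps; Pre_ keeps every visited v indexable)
def pvGetG (gr : List (List (Int × Int))) (v : Int) : List (Int × Int) :=
  (PySem.List.pyGet? gr v).getD []

-- A's recursive dfs, mutating ans in place; the fuel (length+2 at the top call) bounds the
-- recursion depth and is proved sufficient under Pre_ (no reachable cycle)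
def pvDfsA (gr : List (List (Int × Int))) : Nat → Int → Int → List Int → List Int
  | 0, _, _, ans => ans
  | f+1, v, curr, ans =>
    (pvGetG gr v).foldl
      (fun a p => pvDfsA gr f p.1 (PySem.Int.mod (p.2 * curr) pvMod) a)
      (PySem.List.pySetD ans v curr)

def baseUnitConversions (conversions : List (List Int)) : List Int :=
  pvDfsA (pvBuild conversions) (conversions.length + 2) 0 1
    (List.replicate (conversions.length + 1) 0)

-- ===== PORT B =====
-- B phase 1: pop (v, curr), append the write (v, curr) to the trace, push the children in
-- reverse; the fuel bounds the number of pops ((length+1)^(length+2) is proved sufficient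
-- under Pre_, since the number of writes is at most that)
def pvLoopB (gr : List (List (Int × Int))) :
    Nat → List (Int × Int) → List (Int × Int) → List (Int × Int)
  | 0, _, ws => ws
  | _+1, [], ws => ws
  | f+1, (v, curr) :: st, ws =>
    pvLoopB gr f
      ((pvGetG gr v).reverse.foldl
        (fun s p => (p.1, PySem.Int.mod (p.2 * curr) pvMod) :: s) st)
      (ws ++ [(v, curr)])

-- B phase 2: replay the write trace over the zero array (later writes win)
def baseUnitConversions_alt (conversions : List (List Int)) : List Int :=
  (pvLoopB (pvBuild conversions) ((conversions.length + 1) ^ (conversions.length + 2))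
      [(0, 1)] []).foldl
    (fun a q => PySem.List.pySetD a q.1 q.2)
    (List.replicate (conversions.length + 1) 0)

-- ===== PRECONDITION & SPEC =====
-- the unit a Python index in [-(length+1), length+1) denotes (negative indices wrap)
def pvWn (n : Int) (x : Int) : Int := if x < 0 then x + n else x
def pvW (cs : List (List Int)) (x : Int) : Int := pvWn ((cs.length : Int) + 1) x

-- one step of breadth levels: the (deduplicated) targets of conversions whose source lies in S
def pvStepL (cs : List (List Int)) (S : List Int) : List Int :=
  PySem.List.dedup
    ((cs.filter (fun c => decide (pvW cs (pvC0 c) ∈ S))).map (fun c => pvW cs (pvC1 c)))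

-- level k: units at the end of some k-edge conversion path starting at unit 0
def pvL (cs : List (List Int)) (k : Nat) : List Int := (pvStepL cs)^[k] [0]

-- the units reachable from unit 0 (a reachable unit has a repetition-free path, hence one
-- of at most `length` edges)
def pvReach (cs : List (List Int)) : List Int :=
  (List.range (cs.length + 1)).flatMap (fun k => pvL cs k)

-- Pre_ excludes exactly the inputs on which A does not return: a conversion shorter than 3
-- entries or with an unindexable source raises IndexError at the graph build, a reachable
-- conversion with an unindexable target raises IndexError inside dfs, and a conversion cycle
-- reachable from unit 0 (a nonempty level length+1) makes the recursion diverge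
-- (RecursionError).
def Pre_baseUnitConversions (conversions : List (List Int)) : Prop :=
  (∀ c ∈ conversions, 3 ≤ c.length ∧ -((conversions.length : Int) + 1) ≤ pvC0 c
      ∧ pvC0 c < (conversions.length : Int) + 1)
  ∧ (∀ c ∈ conversions, pvW conversions (pvC0 c) ∈ pvReach conversions →
      -((conversions.length : Int) + 1) ≤ pvC1 c ∧ pvC1 c < (conversions.length : Int) + 1)
  ∧ pvL conversions (conversions.length + 1) = []

instance (conversions : List (List Int)) : Decidable (Pre_baseUnitConversions conversions) := by
  unfold Pre_baseUnitConversions; infer_instance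

def pvWitness_baseUnitConversions : List (List Int) := [[0, 1, 3], [1, 2, 5]]

def Spec_baseUnitConversions (conversions : List (List Int)) (out : List Int) : Prop := out = baseUnitConversions_alt conversions
instance (conversions : List (List Int)) (out : List Int) : Decidable (Spec_baseUnitConversions conversions out) := by unfold Spec_baseUnitConversions; infer_instance

-- ===== CLAIM =====
def Claim_equal_baseUnitConversions : Prop := ∀ (conversions : List (List Int)), Dom_baseUnitConversions conversions → Pre_baseUnitConversions conversions → Spec_baseUnitConversions conversions (baseUnitConversions conversions)

-- ===== LEMMAS AND PROOFS =====

-- children as read off the conversion list (u is a normalized unit); n is the list length,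
-- kept abstract for the build induction
def pvKidsN (n : Int) (l : List (List Int)) (u : Int) : List (Int × Int) :=
  (l.filter (fun c => pvWn n (pvC0 c) == u)).map (fun c => (pvC1 c, pvC2 c))

def pvKids (cs : List (List Int)) (u : Int) : List (Int × Int) :=
  pvKidsN ((cs.length : Int) + 1) cs u

-- the preorder write trace of the dfs, depth-bounded by the fuel
def pvTrace (cs : List (List Int)) : Nat → Int → Int → List (Int × Int)
  | 0, _, _ => []
  | f+1, v, c =>
    (v, c) :: (pvKids cs (pvW cs v)).flatMap
      (fun p => pvTrace cs f p.1 (PySem.Int.mod (p.2 * c) pvMod))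

-- "every child chain from the normalized unit u has fewer than f edges"
def pvDeep (cs : List (List Int)) : Nat → Int → Prop
  | 0, _ => False
  | f+1, u => ∀ p ∈ pvKids cs u, pvDeep cs f (pvW cs p.1)

-- a raw stack value: indexable, and its normalization reachable from 0
def pvGood (cs : List (List Int)) (v : Int) : Prop :=
  -((cs.length : Int) + 1) ≤ v ∧ v < (cs.length : Int) + 1 ∧ pvW cs v ∈ pvReach cs

lemma pvWn_bounds {n x : Int} (h0 : -n ≤ x) (h1 : x < n) : 0 ≤ pvWn n x ∧ pvWn n x < n := by
  unfold pvWn; split <;> omega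

lemma pvGet_wrap {α : Type} (xs : List α) (i : Int) (h0 : -(xs.length : Int) ≤ i)
    (h1 : i < (xs.length : Int)) :
    PySem.List.pyGet? xs i = xs[(pvWn (xs.length : Int) i).toNat]? := by
  unfold PySem.List.pyGet? PySem.List.pyIdx? pvWn
  by_cases hi : 0 ≤ i
  · rw [if_pos hi, if_pos h1, if_neg (by omega)]
    rfl
  · rw [if_neg hi, if_pos h0, if_pos (by omega)]
    show xs[xs.length - (-i).toNat]? = _
    congr 1
    omega

lemma pvSet_wrap {α : Type} (xs : List α) (i : Int) (v : α) (h0 : -(xs.length : Int) ≤ i)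
    (h1 : i < (xs.length : Int)) :
    PySem.List.pySetD xs i v = xs.set (pvWn (xs.length : Int) i).toNat v := by
  unfold PySem.List.pySetD PySem.List.pySet? PySem.List.pyIdx? pvWn
  by_cases hi : 0 ≤ i
  · rw [if_pos hi, if_pos h1, if_neg (by omega)]
    rfl
  · rw [if_neg hi, if_pos h0, if_pos (by omega)]
    simp only [Option.map_some, Option.getD_some]
    congr 1
    omega

lemma pvStep_length (gr : List (List (Int × Int))) (c : List Int) :
    (pvStep gr c).length = gr.length := by
  unfold pvStep; split <;> simp [PySem.List.length_pySetD]

lemma pvBuild_fold :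
    ∀ (l : List (List Int)) (gr : List (List (Int × Int))),
      (∀ c ∈ l, -(gr.length : Int) ≤ pvC0 c ∧ pvC0 c < (gr.length : Int)) →
      ∀ (i : Nat), i < gr.length →
      (l.foldl pvStep gr).getD i [] = gr.getD i [] ++ pvKidsN (gr.length : Int) l (i : Int) := by
  intro l
  induction l with
  | nil => intro gr _ i hi; simp [pvKidsN]
  | cons c t ih =>
    intro gr hcond i hi
    have hc := hcond c (List.mem_cons_self ..)
    have hb := pvWn_bounds hc.1 hc.2
    have hjlt : (pvWn (gr.length : Int) (pvC0 c)).toNat < gr.length := by omega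
    have hstep : pvStep gr c = gr.set (pvWn (gr.length : Int) (pvC0 c)).toNat
        (gr[(pvWn (gr.length : Int) (pvC0 c)).toNat] ++ [(pvC1 c, pvC2 c)]) := by
      unfold pvStep
      rw [pvGet_wrap gr _ hc.1 hc.2, List.getElem?_eq_getElem hjlt]
      exact pvSet_wrap gr _ _ hc.1 hc.2
    have hlen : (pvStep gr c).length = gr.length := pvStep_length gr c
    rw [List.foldl_cons, ih (pvStep gr c)
      (by intro c' hc'; rw [hlen]; exact hcond c' (List.mem_cons_of_mem c hc'))
      i (by rwa [hlen]), hlen]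
    have hkids : pvKidsN (gr.length : Int) (c :: t) (i : Int)
        = (if pvWn (gr.length : Int) (pvC0 c) = (i : Int) then [(pvC1 c, pvC2 c)] else [])
          ++ pvKidsN (gr.length : Int) t (i : Int) := by
      unfold pvKidsN
      rw [List.filter_cons]
      by_cases hh : pvWn (gr.length : Int) (pvC0 c) = (i : Int) <;> simp [hh]
    rw [hkids, hstep]
    by_cases hij : (pvWn (gr.length : Int) (pvC0 c)).toNat = i
    · subst hij
      rw [if_pos (by omega)]
      simp only [List.getD_eq_getElem?_getD, List.getElem?_set_self' , List.getElem?_eq_getElem hjlt]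
      simp
    · rw [if_neg (by omega)]
      simp only [List.getD_eq_getElem?_getD, List.getElem?_set, if_neg hij, List.nil_append]

lemma pvFold_length (l : List (List Int)) :
    ∀ (gr : List (List (Int × Int))), (l.foldl pvStep gr).length = gr.length := by
  induction l with
  | nil => intro gr; rfl
  | cons c t ih => intro gr; rw [List.foldl_cons, ih, pvStep_length]

lemma pvBuild_length (cs : List (List Int)) : (pvBuild cs).length = cs.length + 1 := by
  unfold pvBuild; rw [pvFold_length]; simp

lemma pvGetG_build {cs : List (List Int)}
    (h1 : ∀ c ∈ cs, -((cs.length : Int) + 1) ≤ pvC0 c ∧ pvC0 c < (cs.length : Int) + 1)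
    {v : Int} (hv0 : -((cs.length : Int) + 1) ≤ v) (hv1 : v < (cs.length : Int) + 1) :
    pvGetG (pvBuild cs) v = pvKids cs (pvW cs v) := by
  have hlen := pvBuild_length cs
  have hlenI : ((pvBuild cs).length : Int) = (cs.length : Int) + 1 := by
    rw [hlen]; push_cast; ring
  have hb := pvWn_bounds (n := (cs.length : Int) + 1) hv0 hv1
  have hjlt : (pvWn ((cs.length : Int) + 1) v).toNat < (pvBuild cs).length := by omega
  have hcast : (((pvWn ((cs.length : Int) + 1) v).toNat : Nat) : Int)
      = pvWn ((cs.length : Int) + 1) v := by omega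
  have hrepl : (((List.replicate (cs.length + 1) ([] : List (Int × Int))).length : Nat) : Int)
      = (cs.length : Int) + 1 := by simp
  have hfold := pvBuild_fold cs (List.replicate (cs.length + 1) [])
    (by intro c hc; rw [hrepl]; exact h1 c hc)
    (pvWn ((cs.length : Int) + 1) v).toNat
    (by simp only [List.length_replicate]; omega)
  have hgr : (List.replicate (cs.length + 1) ([] : List (Int × Int))).getD
      (pvWn ((cs.length : Int) + 1) v).toNat [] = [] :=
    List.getD_replicate _ (by omega)
  rw [hgr, hrepl, hcast] at hfold
  have hgd : (pvBuild cs).getD (pvWn ((cs.length : Int) + 1) v).toNat []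
      = (pvBuild cs)[(pvWn ((cs.length : Int) + 1) v).toNat] :=
    List.getD_eq_getElem _ _ hjlt
  unfold pvGetG
  rw [pvGet_wrap (pvBuild cs) v (by omega) (by omega), hlenI,
    List.getElem?_eq_getElem hjlt, Option.getD_some, ← hgd]
  unfold pvBuild
  rw [hfold, List.nil_append]
  rfl

lemma pvMem_kids {cs : List (List Int)} {p : Int × Int} {u : Int} :
    p ∈ pvKids cs u ↔ ∃ c ∈ cs, pvW cs (pvC0 c) = u ∧ p = (pvC1 c, pvC2 c) := by
  unfold pvKids pvKidsN pvW
  simp only [List.mem_map, List.mem_filter, beq_iff_eq]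
  constructor
  · rintro ⟨c, ⟨hc, he⟩, rfl⟩; exact ⟨c, hc, he, rfl⟩
  · rintro ⟨c, hc, he, rfl⟩; exact ⟨c, ⟨hc, he⟩, rfl⟩

lemma pvMem_stepL {cs : List (List Int)} {S : List Int} {c : List Int} (hc : c ∈ cs)
    (hS : pvW cs (pvC0 c) ∈ S) : pvW cs (pvC1 c) ∈ pvStepL cs S := by
  unfold pvStepL
  rw [PySem.List.mem_dedup, List.mem_map]
  exact ⟨c, List.mem_filter.mpr ⟨hc, by simpa using hS⟩, rfl⟩

lemma pvStepL_nil (cs : List (List Int)) : pvStepL cs [] = [] := by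
  unfold pvStepL
  rw [List.filter_eq_nil_iff.mpr (by intro c _; simp)]
  rfl

lemma pvL_succ (cs : List (List Int)) (k : Nat) : pvL cs (k + 1) = pvStepL cs (pvL cs k) := by
  unfold pvL; rw [Function.iterate_succ_apply']

lemma pvMem_reach {cs : List (List Int)} {v : Int} :
    v ∈ pvReach cs ↔ ∃ k, k ≤ cs.length ∧ v ∈ pvL cs k := by
  unfold pvReach
  simp only [List.mem_flatMap, List.mem_range]
  constructor
  · rintro ⟨k, hk, hv⟩; exact ⟨k, by omega, hv⟩
  · rintro ⟨k, hk, hv⟩; exact ⟨k, by omega, hv⟩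

lemma pvReach_zero (cs : List (List Int)) : 0 ∈ pvReach cs :=
  pvMem_reach.mpr ⟨0, by omega, by simp [pvL]⟩

lemma pvW_zero (cs : List (List Int)) : pvW cs 0 = 0 := by
  unfold pvW pvWn; rw [if_neg (by omega)]

lemma pvKid_reach {cs : List (List Int)} (h3 : pvL cs (cs.length + 1) = []) {u : Int}
    (hu : u ∈ pvReach cs) {p : Int × Int} (hp : p ∈ pvKids cs u) :
    pvW cs p.1 ∈ pvReach cs := by
  obtain ⟨k, hk, hv⟩ := pvMem_reach.mp hu
  obtain ⟨c, hc, he, rfl⟩ := pvMem_kids.mp hp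
  have hnext : pvW cs (pvC1 c) ∈ pvL cs (k + 1) := by
    rw [pvL_succ]; exact pvMem_stepL hc (he ▸ hv)
  rcases Nat.lt_or_ge k cs.length with hlt | hge
  · exact pvMem_reach.mpr ⟨k + 1, by omega, hnext⟩
  · exfalso
    have : k = cs.length := by omega
    subst this
    rw [h3] at hnext
    cases hnext

lemma pvGood_zero (cs : List (List Int)) : pvGood cs 0 :=
  ⟨by omega, by omega, (pvW_zero cs) ▸ pvReach_zero cs⟩

lemma pvGood_kid {cs : List (List Int)} (h : Pre_baseUnitConversions cs) {v : Int}
    (hv : pvGood cs v) {p : Int × Int} (hp : p ∈ pvKids cs (pvW cs v)) : pvGood cs p.1 := by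
  obtain ⟨c, hc, he, rfl⟩ := pvMem_kids.mp hp
  have hr := h.2.1 c hc (he ▸ hv.2.2)
  exact ⟨hr.1, hr.2, pvKid_reach h.2.2 hv.2.2 hp⟩

-- ===== A's dfs writes exactly its preorder trace =====
lemma pvA_trace {cs : List (List Int)} (h : Pre_baseUnitConversions cs) :
    ∀ (f : Nat) (v c : Int) (ans : List Int), pvGood cs v →
      pvDfsA (pvBuild cs) f v c ans
        = (pvTrace cs f v c).foldl (fun a q => PySem.List.pySetD a q.1 q.2) ans := by
  intro f
  induction f with
  | zero => intro v c ans _; rfl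
  | succ f ih =>
    intro v c ans hv
    show (pvGetG (pvBuild cs) v).foldl
        (fun a p => pvDfsA (pvBuild cs) f p.1 (PySem.Int.mod (p.2 * c) pvMod) a)
        (PySem.List.pySetD ans v c) = _
    rw [pvGetG_build (fun c hc => (h.1 c hc).2) hv.1 hv.2.1]
    unfold pvTrace
    rw [List.foldl_cons, List.foldl_flatMap]
    refine PySem.List.foldl_congr_mem _ _ _ _ (fun acc p hp => ?_)
    exact ih p.1 (PySem.Int.mod (p.2 * c) pvMod) acc (pvGood_kid h hv hp)

-- ===== B's stack loop produces exactly the concatenated traces =====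
lemma pvRevPush (g : Int × Int → Int × Int) :
    ∀ (l st : List (Int × Int)),
      l.reverse.foldl (fun s p => g p :: s) st = l.map g ++ st := by
  intro l
  induction l with
  | nil => intro st; rfl
  | cons a t ih =>
    intro st
    rw [List.reverse_cons, List.foldl_append]
    simp [ih]

lemma pvLoopB_nil (gr : List (List (Int × Int))) (f : Nat) (ws : List (Int × Int)) :
    pvLoopB gr f [] ws = ws := by
  cases f <;> rfl

lemma pvTrace_succ (cs : List (List Int)) (f : Nat) (v c : Int) :
    pvTrace cs (f + 1) v c
      = (v, c) :: (pvKids cs (pvW cs v)).flatMap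
          (fun p => pvTrace cs f p.1 (PySem.Int.mod (p.2 * c) pvMod)) := rfl

lemma pvTrace_len (cs : List (List Int)) (f : Nat) (v c : Int) :
    (pvTrace cs (f + 1) v c).length
      = 1 + ((pvKids cs (pvW cs v)).map
          (fun p => (pvTrace cs f p.1 (PySem.Int.mod (p.2 * c) pvMod)).length)).sum := by
  show ((v, c) :: _).length = _
  rw [List.length_cons, List.length_flatMap]
  omega

lemma pvB_loop {cs : List (List Int)} (h : Pre_baseUnitConversions cs) :
    ∀ (fB : Nat) (E : List (Nat × Int × Int)) (st ws : List (Int × Int)),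
      (∀ e ∈ E, pvGood cs e.2.1 ∧ pvDeep cs e.1 (pvW cs e.2.1)) →
      (E.map (fun e => (pvTrace cs e.1 e.2.1 e.2.2).length)).sum ≤ fB →
      pvLoopB (pvBuild cs) fB (E.map (fun e => e.2) ++ st) ws
        = pvLoopB (pvBuild cs)
            (fB - (E.map (fun e => (pvTrace cs e.1 e.2.1 e.2.2).length)).sum) st
            (ws ++ E.flatMap (fun e => pvTrace cs e.1 e.2.1 e.2.2)) := by
  intro fB
  induction fB with
  | zero =>
    intro E st ws hE hsum
    cases E with
    | nil => simp
    | cons e R =>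
      exfalso
      obtain ⟨f, v, c⟩ := e
      obtain ⟨-, hdeep⟩ := hE (f, v, c) (List.mem_cons_self ..)
      cases f with
      | zero => exact hdeep
      | succ f' =>
        have := pvTrace_len cs f' v c
        simp only [List.map_cons, List.sum_cons] at hsum
        omega
  | succ fB ih =>
    intro E st ws hE hsum
    cases E with
    | nil => simp
    | cons e R =>
      obtain ⟨f, v, c⟩ := e
      obtain ⟨hgood', hdeep'⟩ := hE (f, v, c) (List.mem_cons_self ..)
      have hgood : pvGood cs v := hgood'
      cases f with
      | zero => exact hdeep'.elim
      | succ f' =>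
        have hdeep : ∀ p ∈ pvKids cs (pvW cs v), pvDeep cs f' (pvW cs p.1) := hdeep'
        show pvLoopB (pvBuild cs) (fB + 1) ((v, c) :: (R.map (fun e => e.2) ++ st)) ws = _
        rw [pvLoopB, pvRevPush, pvGetG_build (fun c hc => (h.1 c hc).2) hgood.1 hgood.2.1]
        have hstack : (pvKids cs (pvW cs v)).map
              (fun p => (p.1, PySem.Int.mod (p.2 * c) pvMod)) ++ (R.map (fun e => e.2) ++ st)
            = (((pvKids cs (pvW cs v)).map
                  (fun p => (f', p.1, PySem.Int.mod (p.2 * c) pvMod)) ++ R).map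
                (fun e => e.2)) ++ st := by
          simp [List.map_map, Function.comp_def]
        rw [hstack, ih _ st (ws ++ [(v, c)])
          (by
            intro e he
            rcases List.mem_append.mp he with hL | hR
            · obtain ⟨p, hp, rfl⟩ := List.mem_map.mp hL
              refine ⟨?_, ?_⟩
              · show pvGood cs p.1
                exact pvGood_kid h hgood hp
              · show pvDeep cs f' (pvW cs p.1)
                exact hdeep p hp
            · exact hE e (List.mem_cons_of_mem _ hR))
          (by
            have := pvTrace_len cs f' v c
            simp only [List.map_append, List.map_map, List.map_cons, List.sum_append,
              List.sum_cons, Function.comp_def] at hsum ⊢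
            omega)]
        have hfuel : fB - ((((pvKids cs (pvW cs v)).map
              (fun p => (f', p.1, PySem.Int.mod (p.2 * c) pvMod)) ++ R).map
                (fun e => (pvTrace cs e.1 e.2.1 e.2.2).length)).sum)
            = fB + 1 - ((((f' + 1, v, c) : Nat × Int × Int) :: R).map
                (fun e => (pvTrace cs e.1 e.2.1 e.2.2).length)).sum := by
          have := pvTrace_len cs f' v c
          simp only [List.map_append, List.map_map, List.map_cons, List.sum_append,
            List.sum_cons, Function.comp_def] at this ⊢
          omega
        rw [hfuel]
        congr 1
        show (ws ++ [(v, c)]) ++ _ = ws ++ _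
        rw [List.flatMap_append, List.flatMap_map, List.flatMap_cons, pvTrace_succ]
        simp [List.append_assoc]

-- ===== fuel sufficiency =====
lemma pvDeep_levels {cs : List (List Int)} (h3 : pvL cs (cs.length + 1) = []) :
    ∀ (f k : Nat), k + f = cs.length + 2 → ∀ v ∈ pvL cs k, pvDeep cs f v := by
  intro f
  induction f with
  | zero =>
    intro k hk v hv
    have hk' : k = cs.length + 2 := by omega
    subst hk'
    rw [show cs.length + 2 = (cs.length + 1) + 1 from rfl, pvL_succ, h3, pvStepL_nil] at hv
    cases hv
  | succ f ih =>
    intro k hk v hv p hp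
    obtain ⟨c, hc, he, rfl⟩ := pvMem_kids.mp hp
    apply ih (k + 1) (by omega)
    rw [pvL_succ]
    exact pvMem_stepL hc (he ▸ hv)

lemma pvDeep_root {cs : List (List Int)} (h : Pre_baseUnitConversions cs) :
    pvDeep cs (cs.length + 2) 0 :=
  pvDeep_levels h.2.2 (cs.length + 2) 0 (by omega) 0 (by simp [pvL])

lemma pvSum_le {α : Type} (l : List α) (g : α → Nat) (M : Nat) (h : ∀ x ∈ l, g x ≤ M) :
    (l.map g).sum ≤ l.length * M := by
  induction l with
  | nil => simp
  | cons a t ih =>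
    simp only [List.map_cons, List.sum_cons, List.length_cons]
    have h1 := h a (List.mem_cons_self ..)
    have h2 := ih (fun x hx => h x (List.mem_cons_of_mem a hx))
    ring_nf
    omega

lemma pvKids_len (cs : List (List Int)) (u : Int) : (pvKids cs u).length ≤ cs.length := by
  unfold pvKids pvKidsN
  rw [List.length_map]
  exact List.length_filter_le _ _

lemma pvTrace_bound (cs : List (List Int)) :
    ∀ (f : Nat) (v c : Int), (pvTrace cs f v c).length ≤ (cs.length + 1) ^ f := by
  intro f
  induction f with
  | zero => intro v c; simp [pvTrace]
  | succ f ih =>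
    intro v c
    rw [pvTrace_len]
    have h1 : ((pvKids cs (pvW cs v)).map
        (fun p => (pvTrace cs f p.1 (PySem.Int.mod (p.2 * c) pvMod)).length)).sum
        ≤ (pvKids cs (pvW cs v)).length * (cs.length + 1) ^ f :=
      pvSum_le _ _ _ (fun p _ => ih p.1 (PySem.Int.mod (p.2 * c) pvMod))
    have h2 : (pvKids cs (pvW cs v)).length * (cs.length + 1) ^ f
        ≤ cs.length * (cs.length + 1) ^ f :=
      Nat.mul_le_mul_right _ (pvKids_len cs (pvW cs v))
    have h3 : 1 ≤ (cs.length + 1) ^ f := Nat.one_le_pow _ _ (by omega)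
    have h4 : (cs.length + 1) ^ (f + 1) = cs.length * (cs.length + 1) ^ f + (cs.length + 1) ^ f := by
      ring
    omega

-- ===== VERDICT =====
theorem baseUnitConversions_spec : Claim_equal_baseUnitConversions := by
  intro cs _ h
  unfold Spec_baseUnitConversions baseUnitConversions baseUnitConversions_alt
  rw [pvA_trace h (cs.length + 2) 0 1 _ (pvGood_zero cs)]
  have hloop := pvB_loop h ((cs.length + 1) ^ (cs.length + 2))
    [(cs.length + 2, 0, 1)] [] []
    (by
      intro e he
      simp only [List.mem_singleton] at he
      subst he
      exact ⟨pvGood_zero cs, (pvW_zero cs) ▸ pvDeep_root h⟩)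
    (by simpa using pvTrace_bound cs (cs.length + 2) 0 1)
  simp only [List.map_cons, List.map_nil, List.flatMap_cons, List.flatMap_nil,
    List.append_nil, List.nil_append] at hloop
  rw [hloop, pvLoopB_nil]
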